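-- pv_equiv track=rewrite | github.com/estebanstack/TareaGramaticas | GRAMATICAS/GRAMATICA5/gramatica5.py | acepta_cadena
-- ===== SOURCE A (Python) =====
-- def acepta_cadena(cadena):
--     # Debe empezar con 'a' y terminar con 'b'
--     if len(cadena) < 2 or cadena[0] != 'a' or cadena[-1] != 'b':
--         return False
--
--     # Caso base: "ab"
--     if cadena == "ab":
--         return True
--
--     # Verificar el patrón a(ab)^n b
--     # Desde el segundo carácter hasta el penúltimo deben repetirse "ab"
--     i = 1
--     while i < len(cadena) - 1:
--         if i + 1 >= len(cadena) - 1: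
--             return False  # No hay pareja completa
--         if cadena[i] != 'a' or cadena[i + 1] != 'b':
--             return False
--         i += 2
--     return True
-- ===== SOURCE B (Python) =====
-- def acepta_cadena(cadena):
--     if len(cadena) < 2 or cadena[0] != 'a' or cadena[-1] != 'b':
--         return False
--     middle = cadena[1:-1]
--     return len(middle) % 2 == 0 and middle == 'ab' * (len(middle) // 2)
-- ===== Notes on version B (the rewrite author's own statement) =====
-- stated objective: simpler
-- what changed: Replaces A's manual index-stepping while loop (and special 'ab' base case) with a direct check that the middle slice cadena[1:-1] equals 'ab' repeated half its length.
import Mathlib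
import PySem

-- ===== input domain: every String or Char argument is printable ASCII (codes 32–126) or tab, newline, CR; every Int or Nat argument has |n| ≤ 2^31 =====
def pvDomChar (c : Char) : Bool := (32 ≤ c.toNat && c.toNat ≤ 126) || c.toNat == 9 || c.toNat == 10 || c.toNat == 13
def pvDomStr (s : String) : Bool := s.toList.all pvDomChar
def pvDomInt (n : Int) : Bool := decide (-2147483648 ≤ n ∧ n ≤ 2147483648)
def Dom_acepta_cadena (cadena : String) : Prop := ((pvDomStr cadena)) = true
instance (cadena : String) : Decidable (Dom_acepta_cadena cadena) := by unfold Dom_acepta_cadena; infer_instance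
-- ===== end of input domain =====

-- B replaces A's index-stepping while loop by a direct comparison of the middle
-- slice cadena[1:-1] with 'ab' repeated; objective: simpler (same linear cost).

-- ===== PORT A =====
-- the while loop: i steps by 2 while i < len(cadena) - 1
def aceptaLoop (l : List Char) (i : Nat) : Bool :=
  if _h : i < l.length - 1 then
    if i + 1 ≥ l.length - 1 then false
    else if ¬ (PySem.List.pyGet? l (i : Int) = some 'a' ∧
               PySem.List.pyGet? l ((i : Int) + 1) = some 'b') then false
    else aceptaLoop l (i + 2)
  else true
termination_by l.length - 1 - i
decreasing_by omega

def acepta_cadena (cadena : String) : Bool :=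
  let l := cadena.toList
  if l.length < 2 ∨ PySem.List.pyGet? l 0 ≠ some 'a' ∨ PySem.List.pyGet? l (-1) ≠ some 'b' then
    false
  else if cadena = "ab" then true
  else aceptaLoop l 1

-- ===== PORT B =====
-- 'ab' * k  (string repetition)
def abRep : Nat → List Char
  | 0 => []
  | k + 1 => 'a' :: 'b' :: abRep k

def acepta_cadena_alt (cadena : String) : Bool :=
  let l := cadena.toList
  if l.length < 2 ∨ PySem.List.pyGet? l 0 ≠ some 'a' ∨ PySem.List.pyGet? l (-1) ≠ some 'b' then
    false
  else
    let middle := PySem.List.slice l (some 1) (some (-1))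
    (middle.length % 2 == 0) && (middle == abRep (middle.length / 2))

-- ===== PRECONDITION & SPEC =====
def Spec_acepta_cadena (cadena : String) (out : Bool) : Prop := out = acepta_cadena_alt cadena
instance (cadena : String) (out : Bool) : Decidable (Spec_acepta_cadena cadena out) := by unfold Spec_acepta_cadena; infer_instance

-- ===== CLAIM (what is proved, stated in full; the proofs are below) =====
def Claim_equal_acepta_cadena : Prop := ∀ (cadena : String), Dom_acepta_cadena cadena → Spec_acepta_cadena cadena (acepta_cadena cadena)

-- ===== LEMMAS AND PROOFS =====

-- structural checker for the middle part: a sequence of 'ab' pairs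
def chkMid : List Char → Bool
  | [] => true
  | [_] => false
  | a :: b :: rest => (a == 'a') && (b == 'b') && chkMid rest

theorem chkMid_eq_abRep (m : List Char) :
    chkMid m = ((m.length % 2 == 0) && (m == abRep (m.length / 2))) := by
  induction m using chkMid.induct with
  | case1 => simp [chkMid, abRep]
  | case2 x => simp [chkMid]
  | case3 a b rest ih =>
    have h2 : (rest.length + 1 + 1) / 2 = rest.length / 2 + 1 := by omega
    have h3 : (rest.length + 1 + 1) % 2 = rest.length % 2 := by omega
    simp only [chkMid, List.length_cons, h2, h3, abRep, ih]
    by_cases ha : a = 'a' <;> by_cases hb : b = 'b' <;>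
      simp [ha, hb, Bool.and_assoc, Bool.and_comm]

theorem aceptaLoop_eq_chkMid (l : List Char) (i : Nat) (hi : i ≤ l.length - 1) :
    aceptaLoop l i = chkMid ((l.drop i).take (l.length - 1 - i)) := by
  generalize hk : l.length - 1 - i = k
  induction k using Nat.strong_induction_on generalizing i with
  | _ k ih =>
    rw [aceptaLoop]
    by_cases h : i < l.length - 1
    · have hil : i < l.length := by omega
      by_cases h1 : i + 1 ≥ l.length - 1
      · -- k = 1 : a lone middle char remains
        have hk' : k = 1 := by omega
        subst hk'
        have ht : (l.drop i).take 1 = [l[i]] := by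
          rw [List.drop_eq_getElem_cons hil, List.take_succ_cons, List.take_zero]
        simp only [ht, chkMid]
        simp [h, h1]
      · -- k ≥ 2 : peel off two chars
        have hi1 : i + 1 < l.length := by omega
        have hget : PySem.List.pyGet? l (i : Int) = some l[i] :=
          PySem.List.pyGet?_ofNat l i hil
        have hget1 : PySem.List.pyGet? l ((i : Int) + 1) = some l[i+1] := by
          have := PySem.List.pyGet?_ofNat l (i + 1) hi1
          simpa using this
        have hrest : (l.drop i).take k
            = l[i] :: l[i+1] :: (l.drop (i+2)).take (l.length - 1 - (i+2)) := by
          rw [List.drop_eq_getElem_cons hil, List.drop_eq_getElem_cons hi1]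
          have e1 : k = (l.length - 1 - (i+1) - 1) + 1 + 1 := by omega
          have e2 : l.length - 1 - (i+1) - 1 = l.length - 1 - (i+2) := by omega
          rw [e1, List.take_succ_cons, List.take_succ_cons, e2]
        have hrec := ih (l.length - 1 - (i+2)) (by omega) (i + 2) (by omega) rfl
        by_cases ha : l[i] = 'a'
        · by_cases hb : l[i+1] = 'b'
          · simp [h, h1, hget, hget1, hrest, chkMid, hrec, ha, hb]
          · simp [h, h1, hget, hget1, hrest, chkMid, ha, hb]
        · simp [h, h1, hget, hget1, hrest, chkMid, ha]
    · have hk0 : k = 0 := by omega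
      subst hk0
      simp [h, chkMid]

theorem middle_slice (l : List Char) (h : 2 ≤ l.length) :
    PySem.List.slice l (some 1) (some (-1)) = (l.drop 1).take (l.length - 1 - 1) := by
  have hne : l ≠ [] := by intro e; simp [e] at h
  simp [PySem.List.slice, PySem.List.clampIdx, hne, List.drop_one,
    Nat.min_eq_left (show 1 ≤ l.length by omega)]
  omega

-- ===== VERDICT (by name: the statement is the Claim_ definition above) =====
theorem acepta_cadena_spec : Claim_equal_acepta_cadena := by
  intro cadena _
  unfold Spec_acepta_cadena acepta_cadena acepta_cadena_alt
  have hL : cadena.toList.length = cadena.length := by simp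
  by_cases hg : cadena.toList.length < 2 ∨ PySem.List.pyGet? cadena.toList 0 ≠ some 'a' ∨
      PySem.List.pyGet? cadena.toList (-1) ≠ some 'b'
  · obtain h | h | h := hg
    · simp [show cadena.length ≤ 1 from by omega]
    · simp [h]
    · simp [h]
  · push_neg at hg
    obtain ⟨h2', ha, hb⟩ := hg
    have h2 : 2 ≤ cadena.toList.length := by omega
    by_cases hab : cadena = "ab"
    · subst hab; decide
    · have hmid := middle_slice cadena.toList h2
      have hloop := aceptaLoop_eq_chkMid cadena.toList 1 (by omega)
      have hlen : ((cadena.toList.drop 1).take (cadena.toList.length - 1 - 1)).length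
          = cadena.toList.length - 1 - 1 := by
        simp
      have hchk := chkMid_eq_abRep ((cadena.toList.drop 1).take (cadena.toList.length - 1 - 1))
      rw [hlen] at hchk
      rw [List.drop_one] at hmid hloop hchk
      rw [hL] at hmid hloop hchk
      simp [ha, hb, hab, hmid, hloop, hchk,
        show ¬ cadena.length ≤ 1 from by omega]
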